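-- pv_equiv track=rewrite | github.com/d-easton/fairytale | nlp/parse.py | calculate_corpus_emotive_scores
-- ===== SOURCE A (Python) =====
-- def convert_index_to_emotion(index):
--     if index == 0:
--         return 'anger'
--     elif index == 1:
--         return 'anticipation'
--     elif index == 2:
--         return 'disgust'
--     elif index == 3:
--         return 'fear'
--     elif index == 4:
--         return 'joy'
--     elif index == 5:
--         return 'negative'
--     elif index == 6:
--         return 'positive'
--     elif index == 7:
--         return 'sadness'
--     elif index == 8:
--         return 'surprise'
--     elif index == 9:
--         return 'trust'
--     else:
--         return 'invalid'
--
-- def calculate_corpus_emotive_scores(corpus, lexicon):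
--     emotive_corpus = {}
--     for title in corpus:
--         emotive_scores = {
--             "anger": 0,
--             "anticipation": 0,
--             "disgust": 0,
--             "fear": 0,
--             "joy": 0,
--             "negative": 0,
--             "positive": 0,
--             "sadness": 0,
--             "surprise": 0,
--             "trust": 0
--         }
--         for token in corpus[title]:
--             if token in lexicon:
--                 for i in range(0,10):
--                     emotive_scores[convert_index_to_emotion(i)] += lexicon[token][i]
--
--         emotive_corpus[title] = emotive_scores
--     return emotive_corpus
-- ===== SOURCE B (Python) =====
-- EMOTIONS = ("anger", "anticipation", "disgust", "fear", "joy",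
--             "negative", "positive", "sadness", "surprise", "trust")
--
-- def calculate_corpus_emotive_scores(corpus, lexicon):
--     emotive_corpus = {}
--     for title in corpus:
--         counts = {}
--         for tok in corpus[title]:
--             counts[tok] = counts.get(tok, 0) + 1
--         totals = [0] * 10
--         for word, vec in lexicon.items():
--             c = counts.get(word, 0)
--             if c:
--                 totals = [t + c * v for t, v in zip(totals, vec)]
--         emotive_corpus[title] = dict(zip(EMOTIONS, totals))
--     return emotive_corpus
-- ===== Notes on version B (the rewrite author's own statement) =====
-- stated objective: alternative
-- what changed: A scans each title's TOKENS, updating a 10-key emotion dict once per token per emotion via an inner range(10) loop over convert_index_to_emotion; B first builds a token-frequency table per title and then makes a single pass over the LEXICON, adding count*vector (a multiplicity-scaled vector addition) once per lexicon word, and assembles the result as dict(zip(EMOTIONS, totals)).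
import Mathlib
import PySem

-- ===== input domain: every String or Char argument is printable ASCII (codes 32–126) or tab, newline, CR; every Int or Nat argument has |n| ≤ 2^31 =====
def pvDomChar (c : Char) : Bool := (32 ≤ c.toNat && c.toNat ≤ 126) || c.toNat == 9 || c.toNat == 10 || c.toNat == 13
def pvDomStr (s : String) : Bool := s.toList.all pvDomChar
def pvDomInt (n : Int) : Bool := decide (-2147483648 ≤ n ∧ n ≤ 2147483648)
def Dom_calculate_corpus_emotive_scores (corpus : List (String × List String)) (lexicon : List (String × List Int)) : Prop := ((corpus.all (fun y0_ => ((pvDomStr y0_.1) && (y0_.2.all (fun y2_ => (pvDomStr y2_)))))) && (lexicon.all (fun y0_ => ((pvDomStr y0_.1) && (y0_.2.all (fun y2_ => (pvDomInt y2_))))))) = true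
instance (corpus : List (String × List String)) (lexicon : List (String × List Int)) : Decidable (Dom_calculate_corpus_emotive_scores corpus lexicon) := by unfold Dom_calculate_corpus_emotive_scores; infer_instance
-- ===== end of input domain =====

-- B inverts the whole computation: instead of A's pass over the TOKENS accumulating into a 10-key
-- emotion dict (one dict update per token per emotion), B builds a token-frequency table per title
-- and then makes a single pass over the LEXICON, adding count * vector once per lexicon word
-- (objective: alternative algorithm — multiplicity-scaled lexicon scan instead of token scan).

-- ===== PORT A =====
def convert_index_to_emotion (index : Int) : String :=
  if index = 0 then "anger"
  else if index = 1 then "anticipation"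
  else if index = 2 then "disgust"
  else if index = 3 then "fear"
  else if index = 4 then "joy"
  else if index = 5 then "negative"
  else if index = 6 then "positive"
  else if index = 7 then "sadness"
  else if index = 8 then "surprise"
  else if index = 9 then "trust"
  else "invalid"

-- the fresh emotive_scores dict A builds for each title
def pvScores0 : PySem.Dict String Int :=
  PySem.Dict.ofList [("anger", 0), ("anticipation", 0), ("disgust", 0), ("fear", 0), ("joy", 0),
                     ("negative", 0), ("positive", 0), ("sadness", 0), ("surprise", 0), ("trust", 0)]

-- A's per-token body: if token in lexicon, add lexicon[token][i] into the score dict for i in range(0,10)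
-- (PySem.List.pyGetD stands for lexicon[token][i]; Pre_ guarantees the index is in range, so Python's
--  IndexError region is excluded and the default is never used)
def pvStep (lexD : PySem.Dict String (List Int)) (sc : PySem.Dict String Int) (tok : String) : PySem.Dict String Int :=
  if lexD.contains tok then
    (PySem.List.pyRange 0 10 1).foldl
      (fun sc i => sc.modify (convert_index_to_emotion i) 0
        (fun v => v + PySem.List.pyGetD (lexD.getD tok []) i 0)) sc
  else sc

def calculate_corpus_emotive_scores (corpus : List (String × List String)) (lexicon : List (String × List Int)) : List (String × List (String × Int)) :=
  ((PySem.Dict.ofList corpus).items.foldl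
      (fun ec p => ec.insert p.1 (p.2.foldl (pvStep (PySem.Dict.ofList lexicon)) pvScores0))
      PySem.Dict.empty).items.map (fun q => (q.1, q.2.items))

-- ===== PORT B =====
def pvEmotions : List String :=
  ["anger", "anticipation", "disgust", "fear", "joy",
   "negative", "positive", "sadness", "surprise", "trust"]

-- counts[tok] = counts.get(tok, 0) + 1 over the title's tokens
def pvCounts (toks : List String) : PySem.Dict String Int :=
  toks.foldl (fun d t => d.insert t (d.getD t 0 + 1)) PySem.Dict.empty

-- totals = [t + c * v for t, v in zip(totals, vec)]
def pvAddScaled (tot : List Int) (c : Int) (vec : List Int) : List Int :=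
  (tot.zip vec).map (fun tv => tv.1 + c * tv.2)

-- the lexicon pass: for word, vec in lexicon.items(): if counts.get(word, 0): totals += c * vec
def pvTotals (cnt : PySem.Dict String Int) (lexItems : List (String × List Int)) : List Int :=
  lexItems.foldl
    (fun tot q => if cnt.getD q.1 0 ≠ 0 then pvAddScaled tot (cnt.getD q.1 0) q.2 else tot)
    (List.replicate 10 0)

-- dict(zip(EMOTIONS, totals)): the 10 emotion keys are distinct, so the dict's association list
-- (insertion order) is exactly the zip list.
def calculate_corpus_emotive_scores_alt (corpus : List (String × List String)) (lexicon : List (String × List Int)) : List (String × List (String × Int)) :=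
  ((PySem.Dict.ofList corpus).items.foldl
      (fun ec p => ec.insert p.1
        (pvEmotions.zip (pvTotals (pvCounts p.2) (PySem.Dict.ofList lexicon).items)))
      PySem.Dict.empty).items

-- ===== PRECONDITION & SPEC =====
-- Pre_ excludes exactly the inputs where Python A raises IndexError: a token of some title that is
-- a key of the lexicon whose emotion vector has fewer than 10 entries.
def Pre_calculate_corpus_emotive_scores (corpus : List (String × List String)) (lexicon : List (String × List Int)) : Prop :=
  ∀ p ∈ (PySem.Dict.ofList corpus).items, ∀ tok ∈ p.2,
    (PySem.Dict.ofList lexicon).contains tok = true →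
      10 ≤ ((PySem.Dict.ofList lexicon).getD tok []).length
instance (corpus : List (String × List String)) (lexicon : List (String × List Int)) : Decidable (Pre_calculate_corpus_emotive_scores corpus lexicon) := by unfold Pre_calculate_corpus_emotive_scores; infer_instance

def pvWitness_calculate_corpus_emotive_scores : (List (String × List String)) × (List (String × List Int)) :=
  ([("tale", ["good", "bad", "good", "xx"])], [("good", [1, 2, 3, 4, 5, 6, 7, 8, 9, 10]), ("bad", [0, -1, 0, 0, 0, 2, 0, 0, 0, 0])])

def Spec_calculate_corpus_emotive_scores (corpus : List (String × List String)) (lexicon : List (String × List Int)) (out : List (String × List (String × Int))) : Prop := out = calculate_corpus_emotive_scores_alt corpus lexicon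
instance (corpus : List (String × List String)) (lexicon : List (String × List Int)) (out : List (String × List (String × Int))) : Decidable (Spec_calculate_corpus_emotive_scores corpus lexicon out) := by unfold Spec_calculate_corpus_emotive_scores; infer_instance

-- ===== CLAIM (what is proved, stated in full; the proofs are below) =====
def Claim_equal_calculate_corpus_emotive_scores : Prop := ∀ (corpus : List (String × List String)) (lexicon : List (String × List Int)), Dom_calculate_corpus_emotive_scores corpus lexicon → Pre_calculate_corpus_emotive_scores corpus lexicon → Spec_calculate_corpus_emotive_scores corpus lexicon (calculate_corpus_emotive_scores corpus lexicon)

-- ===== LEMMAS AND PROOFS =====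

-- the A-side column sum: over the in-lexicon tokens, component i of their lexicon vectors
def pvS (lexD : PySem.Dict String (List Int)) (toks : List String) (i : Int) : Int :=
  ((toks.filter (fun t => lexD.contains t)).map
    (fun t => PySem.List.pyGetD (lexD.getD t []) i 0)).sum

-- the B-side column sum: over the lexicon entries, multiplicity in toks times component i
def pvCol (toks : List String) (L : List (String × List Int)) (i : Int) : Int :=
  (L.map (fun q => ((toks.count q.1 : Int)) * PySem.List.pyGetD q.2 i 0)).sum

lemma pvRange10 : PySem.List.pyRange 0 10 1 = [0, 1, 2, 3, 4, 5, 6, 7, 8, 9] := rfl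

lemma pvInner_getD (lexD : PySem.Dict String (List Int)) (tok : String) (sc : PySem.Dict String Int)
    (i : Int) (hi : i ∈ PySem.List.pyRange 0 10 1) :
    ((PySem.List.pyRange 0 10 1).foldl
      (fun sc x => sc.modify (convert_index_to_emotion x) 0
        (fun v => v + PySem.List.pyGetD (lexD.getD tok []) x 0)) sc).getD (convert_index_to_emotion i) 0
    = sc.getD (convert_index_to_emotion i) 0 + PySem.List.pyGetD (lexD.getD tok []) i 0 := by
  rw [pvRange10] at hi
  rw [pvRange10]
  fin_cases hi <;>
    simp [List.foldl, convert_index_to_emotion, PySem.Dict.getD_modify]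

lemma pvStep_getD (lexD : PySem.Dict String (List Int)) (sc : PySem.Dict String Int) (tok : String)
    (i : Int) (hi : i ∈ PySem.List.pyRange 0 10 1) :
    (pvStep lexD sc tok).getD (convert_index_to_emotion i) 0
    = sc.getD (convert_index_to_emotion i) 0
      + (if lexD.contains tok then PySem.List.pyGetD (lexD.getD tok []) i 0 else 0) := by
  unfold pvStep
  by_cases h : lexD.contains tok = true
  · simp only [h, if_true, pvInner_getD lexD tok sc i hi]
  · simp only [Bool.not_eq_true] at h
    simp [h]

lemma pvFold_getD (lexD : PySem.Dict String (List Int)) (toks : List String)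
    (sc : PySem.Dict String Int) (i : Int) (hi : i ∈ PySem.List.pyRange 0 10 1) :
    (toks.foldl (pvStep lexD) sc).getD (convert_index_to_emotion i) 0
    = sc.getD (convert_index_to_emotion i) 0
      + ((toks.filter (fun tok => lexD.contains tok)).map
          (fun tok => PySem.List.pyGetD (lexD.getD tok []) i 0)).sum := by
  induction toks generalizing sc with
  | nil => simp
  | cons t ts ih =>
    rw [List.foldl_cons, ih, pvStep_getD lexD sc t i hi, List.filter_cons]
    by_cases h : lexD.contains t = true
    · simp [h]; ring
    · simp only [Bool.not_eq_true] at h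
      simp [h]

lemma pvStep_keys (lexD : PySem.Dict String (List Int)) (sc : PySem.Dict String Int) (tok : String)
    (h : sc.keys = pvEmotions) : (pvStep lexD sc tok).keys = pvEmotions := by
  unfold pvStep
  by_cases hc : lexD.contains tok = true
  · simp only [hc, if_true]
    rw [PySem.Dict.keys_foldl_modify_key (PySem.List.pyRange 0 10 1)
        (fun x => convert_index_to_emotion x) 0
        (fun _ x v => v + PySem.List.pyGetD (lexD.getD tok []) x 0) sc, h, pvRange10]
    decide
  · simp only [Bool.not_eq_true] at hc
    simp [hc, h]

lemma pvFold_keys (lexD : PySem.Dict String (List Int)) (toks : List String)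
    (sc : PySem.Dict String Int) (h : sc.keys = pvEmotions) :
    (toks.foldl (pvStep lexD) sc).keys = pvEmotions := by
  induction toks generalizing sc with
  | nil => exact h
  | cons t ts ih => exact ih _ (pvStep_keys lexD sc t h)

lemma pvScores0_getD (i : Int) (hi : i ∈ PySem.List.pyRange 0 10 1) :
    pvScores0.getD (convert_index_to_emotion i) 0 = 0 := by
  rw [pvRange10] at hi
  fin_cases hi <;> decide

-- A's per-title score dict, as an explicit association list of the ten column sums
lemma pvTitleA (lexD : PySem.Dict String (List Int)) (toks : List String) :
    (toks.foldl (pvStep lexD) pvScores0).items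
    = [("anger", pvS lexD toks 0), ("anticipation", pvS lexD toks 1), ("disgust", pvS lexD toks 2),
       ("fear", pvS lexD toks 3), ("joy", pvS lexD toks 4), ("negative", pvS lexD toks 5),
       ("positive", pvS lexD toks 6), ("sadness", pvS lexD toks 7), ("surprise", pvS lexD toks 8),
       ("trust", pvS lexD toks 9)] := by
  have hk : (toks.foldl (pvStep lexD) pvScores0).keys = pvEmotions :=
    pvFold_keys lexD toks pvScores0 (by decide)
  have hnd : (toks.foldl (pvStep lexD) pvScores0).keys.Nodup := by rw [hk]; decide
  have hg : ∀ i : Int, i ∈ PySem.List.pyRange 0 10 1 →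
      (toks.foldl (pvStep lexD) pvScores0).getD (convert_index_to_emotion i) 0
      = pvS lexD toks i := by
    intro i hi
    rw [pvFold_getD lexD toks pvScores0 i hi, pvScores0_getD i hi, zero_add, pvS]
  rw [PySem.Dict.items_eq_map_keys _ hnd 0, hk]
  rw [show pvEmotions = ["anger", "anticipation", "disgust", "fear", "joy",
       "negative", "positive", "sadness", "surprise", "trust"] from rfl]
  simp only [List.map_cons, List.map_nil, List.cons.injEq, Prod.mk.injEq, true_and, and_true]
  exact ⟨hg 0 (by decide), hg 1 (by decide), hg 2 (by decide), hg 3 (by decide), hg 4 (by decide),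
         hg 5 (by decide), hg 6 (by decide), hg 7 (by decide), hg 8 (by decide), hg 9 (by decide)⟩

-- B-side lemmas ------------------------------------------------------------

lemma pvCounts_eq (toks : List String) : pvCounts toks = PySem.Dict.counter toks :=
  PySem.Dict.foldl_insert_getD_add_one_eq_counter toks

set_option maxHeartbeats 1000000 in
lemma pvAddScaled_ten (a0 a1 a2 a3 a4 a5 a6 a7 a8 a9 c : Int) (vec : List Int)
    (h : 10 ≤ vec.length) :
    pvAddScaled [a0, a1, a2, a3, a4, a5, a6, a7, a8, a9] c vec
    = [a0 + c * PySem.List.pyGetD vec 0 0, a1 + c * PySem.List.pyGetD vec 1 0,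
       a2 + c * PySem.List.pyGetD vec 2 0, a3 + c * PySem.List.pyGetD vec 3 0,
       a4 + c * PySem.List.pyGetD vec 4 0, a5 + c * PySem.List.pyGetD vec 5 0,
       a6 + c * PySem.List.pyGetD vec 6 0, a7 + c * PySem.List.pyGetD vec 7 0,
       a8 + c * PySem.List.pyGetD vec 8 0, a9 + c * PySem.List.pyGetD vec 9 0] := by
  rcases vec with _|⟨v0,_|⟨v1,_|⟨v2,_|⟨v3,_|⟨v4,_|⟨v5,_|⟨v6,_|⟨v7,_|⟨v8,_|⟨v9,rest⟩⟩⟩⟩⟩⟩⟩⟩⟩⟩ <;>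
    (try (exfalso; simp at h; done))
  simp [pvAddScaled, pysem]

lemma pvCol_cons (toks : List String) (q : String × List Int) (L : List (String × List Int)) (i : Int) :
    pvCol toks (q :: L) i = (toks.count q.1 : Int) * PySem.List.pyGetD q.2 i 0 + pvCol toks L i := by
  simp [pvCol]

lemma pvFoldTotals (toks : List String) (L : List (String × List Int))
    (H : ∀ q ∈ L, toks.count q.1 ≠ 0 → 10 ≤ q.2.length)
    (a0 a1 a2 a3 a4 a5 a6 a7 a8 a9 : Int) :
    L.foldl
      (fun tot q => if (PySem.Dict.counter toks).getD q.1 0 ≠ 0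
        then pvAddScaled tot ((PySem.Dict.counter toks).getD q.1 0) q.2 else tot)
      [a0, a1, a2, a3, a4, a5, a6, a7, a8, a9]
    = [a0 + pvCol toks L 0, a1 + pvCol toks L 1, a2 + pvCol toks L 2, a3 + pvCol toks L 3,
       a4 + pvCol toks L 4, a5 + pvCol toks L 5, a6 + pvCol toks L 6, a7 + pvCol toks L 7,
       a8 + pvCol toks L 8, a9 + pvCol toks L 9] := by
  induction L generalizing a0 a1 a2 a3 a4 a5 a6 a7 a8 a9 with
  | nil => simp [pvCol]
  | cons q L' ih =>
    have hc : (PySem.Dict.counter toks).getD q.1 0 = (toks.count q.1 : Int) :=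
      PySem.Dict.getD_counter toks q.1
    have H' : ∀ r ∈ L', toks.count r.1 ≠ 0 → 10 ≤ r.2.length :=
      fun r hr => H r (List.mem_cons_of_mem q hr)
    rw [List.foldl_cons]
    by_cases h0 : toks.count q.1 = 0
    · rw [if_neg (by rw [hc, h0]; simp)]
      rw [ih H']
      simp [pvCol_cons, h0]
    · rw [if_pos (by rw [hc]; exact_mod_cast h0)]
      rw [hc, pvAddScaled_ten _ _ _ _ _ _ _ _ _ _ _ _ (H q (List.mem_cons_self) h0), ih H']
      simp [pvCol_cons, add_assoc]

lemma pvSumZero (L : List (String × List Int)) (t : String) (i : Int)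
    (h : ∀ q ∈ L, q.1 ≠ t) :
    (L.map (fun q => (if q.1 = t then (1 : Int) else 0) * PySem.List.pyGetD q.2 i 0)).sum = 0 := by
  induction L with
  | nil => simp
  | cons q L' ih =>
    have hq : q.1 ≠ t := h q (List.mem_cons_self)
    simp only [List.map_cons, List.sum_cons, if_neg hq, zero_mul, zero_add]
    exact ih (fun r hr => h r (List.mem_cons_of_mem q hr))

lemma pvSumOne (L : List (String × List Int)) (t : String) (v : List Int) (i : Int)
    (hnd : (L.map Prod.fst).Nodup) (hmem : (t, v) ∈ L) :
    (L.map (fun q => (if q.1 = t then (1 : Int) else 0) * PySem.List.pyGetD q.2 i 0)).sum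
    = PySem.List.pyGetD v i 0 := by
  induction L with
  | nil => simp at hmem
  | cons q L' ih =>
    simp only [List.map_cons, List.nodup_cons] at hnd
    rcases List.mem_cons.mp hmem with h | h
    · subst h
      have hz := pvSumZero L' t i
        (fun r hr hrt => hnd.1 ((List.mem_map).mpr ⟨r, hr, hrt⟩))
      simp only [List.map_cons, List.sum_cons]
      rw [if_pos trivial, one_mul, hz, add_zero]
    · have hq : q.1 ≠ t := by
        intro he
        exact hnd.1 (by rw [he]; exact (List.mem_map (f := Prod.fst)).mpr ⟨(t, v), h, rfl⟩)
      simp only [List.map_cons, List.sum_cons, if_neg hq, zero_mul, zero_add]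
      exact ih hnd.2 h

lemma pvColsum (lexD : PySem.Dict String (List Int)) (hnd : lexD.keys.Nodup)
    (toks : List String) (i : Int) :
    pvS lexD toks i = pvCol toks lexD.items i := by
  induction toks with
  | nil => simp [pvS, pvCol]
  | cons t ts ih =>
    have hcons : pvCol (t :: ts) lexD.items i
        = pvCol ts lexD.items i
          + (lexD.items.map (fun q => (if q.1 = t then (1 : Int) else 0)
              * PySem.List.pyGetD q.2 i 0)).sum := by
      unfold pvCol
      rw [← PySem.List.sum_map_add_int]
      refine congrArg List.sum (List.map_congr_left ?_)
      intro q _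
      rw [List.count_cons]
      by_cases hq : q.1 = t
      · simp [hq]; ring
      · simp [hq, Ne.symm hq]
    rw [hcons, ← ih]
    unfold pvS
    rw [List.filter_cons]
    by_cases hct : lexD.contains t = true
    · obtain ⟨v, hv⟩ : ∃ v, lexD.get? t = some v := by
        have := PySem.Dict.contains_eq_isSome_get? lexD t
        rw [hct] at this
        exact Option.isSome_iff_exists.mp this.symm
      have hmem : (t, v) ∈ lexD.items := PySem.Dict.mem_items_of_get?_eq_some lexD hv
      have hgd : lexD.getD t [] = v := PySem.Dict.getD_of_get?_eq_some lexD [] hv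
      have hnd' : (lexD.items.map Prod.fst).Nodup := hnd
      rw [pvSumOne lexD.items t v i hnd' hmem]
      simp [hct, hgd]
      ring
    · have hcf : lexD.contains t = false := by simpa using hct
      have hz : ∀ q ∈ lexD.items, q.1 ≠ t := by
        intro q hq he
        have h2 := (PySem.Dict.contains_iff_mem_keys lexD t).mpr
          (he ▸ PySem.Dict.mem_keys_of_mem_items lexD hq)
        rw [hcf] at h2
        exact Bool.false_ne_true h2
      rw [pvSumZero lexD.items t i hz]
      simp [hcf]

-- per title: B's emotions-zip-totals list equals A's score-dict items
lemma pvTitleB (lexD : PySem.Dict String (List Int)) (toks : List String)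
    (hnd : lexD.keys.Nodup)
    (hpre : ∀ tok ∈ toks, lexD.contains tok = true → 10 ≤ (lexD.getD tok []).length) :
    pvEmotions.zip (pvTotals (pvCounts toks) lexD.items)
    = (toks.foldl (pvStep lexD) pvScores0).items := by
  have H : ∀ q ∈ lexD.items, toks.count q.1 ≠ 0 → 10 ≤ q.2.length := by
    intro q hq hcnt
    have ht : q.1 ∈ toks := by
      by_contra hmem
      exact hcnt (List.count_eq_zero.mpr hmem)
    have hco : lexD.contains q.1 = true :=
      (PySem.Dict.contains_iff_mem_keys lexD q.1).mpr (PySem.Dict.mem_keys_of_mem_items lexD hq)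
    have := hpre q.1 ht hco
    rwa [PySem.Dict.getD_of_mem_items lexD hq hnd] at this
  unfold pvTotals
  rw [pvCounts_eq, show (List.replicate 10 (0 : Int)) = [0,0,0,0,0,0,0,0,0,0] from rfl,
      pvFoldTotals toks lexD.items H, pvTitleA lexD toks]
  simp [pvEmotions, pvColsum lexD hnd toks]

-- ===== VERDICT (by name: the statement is the Claim_ definition above) =====
theorem calculate_corpus_emotive_scores_spec : Claim_equal_calculate_corpus_emotive_scores := by
  intro corpus lexicon _hdom hpre
  unfold Spec_calculate_corpus_emotive_scores
  unfold calculate_corpus_emotive_scores calculate_corpus_emotive_scores_alt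
  rw [PySem.Dict.items_foldl_insert_fresh (PySem.Dict.ofList corpus).items (fun p => p.1)
      (fun p => p.2.foldl (pvStep (PySem.Dict.ofList lexicon)) pvScores0) PySem.Dict.empty
      (fun a _ => PySem.Dict.contains_empty a.1)
      (by simpa [PySem.Dict.keys] using PySem.Dict.nodup_keys_ofList corpus)]
  rw [PySem.Dict.items_foldl_insert_fresh (PySem.Dict.ofList corpus).items (fun p => p.1)
      (fun p => pvEmotions.zip (pvTotals (pvCounts p.2) (PySem.Dict.ofList lexicon).items)) PySem.Dict.empty
      (fun a _ => PySem.Dict.contains_empty a.1)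
      (by simpa [PySem.Dict.keys] using PySem.Dict.nodup_keys_ofList corpus)]
  rw [show (PySem.Dict.empty : PySem.Dict String (PySem.Dict String Int)).items = [] from rfl]
  rw [show (PySem.Dict.empty : PySem.Dict String (List (String × Int))).items = [] from rfl]
  rw [List.nil_append, List.nil_append, List.map_map]
  refine List.map_congr_left ?_
  intro p hp
  refine congrArg (fun l => (p.1, l)) ?_
  exact (pvTitleB (PySem.Dict.ofList lexicon) p.2 (PySem.Dict.nodup_keys_ofList lexicon)
    (fun tok htok => hpre p hp tok htok)).symm
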